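-- pv_equiv track=rewrite | github.com/Szuwar6/cwiczenia | do testow 2.py | subtract_sum
-- ===== SOURCE A (Python) =====
-- def subtract_sum(number = 10):
--     dict = {99: "apple", 9: "apple"}
--     n = number
--     z = 0
--
--     while n > 9:
--             z = sum(int(i) for i in str(n))
--             n -= z
--     return dict[n]
-- ===== SOURCE B (Python) =====
-- def subtract_sum(number = 10):
--     # Repeated digit-sum subtraction from any number > 9 always lands on 9
--     # (each step lands on a positive multiple of 9 and decreases), so the
--     # loop's final value is 9 for number > 9 and number itself otherwise.
--     return {99: "apple", 9: "apple"}[9 if number > 9 else number]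
-- ===== Notes on version B (the rewrite author's own statement) =====
-- stated objective: faster
-- what changed: Replaced the while-loop that repeatedly subtracts the digit sum (each step lands on a positive multiple of 9 and decreases, so it always terminates at 9) by the closed form '9 if number > 9 else number' fed to the same dict lookup.
import Mathlib
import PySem

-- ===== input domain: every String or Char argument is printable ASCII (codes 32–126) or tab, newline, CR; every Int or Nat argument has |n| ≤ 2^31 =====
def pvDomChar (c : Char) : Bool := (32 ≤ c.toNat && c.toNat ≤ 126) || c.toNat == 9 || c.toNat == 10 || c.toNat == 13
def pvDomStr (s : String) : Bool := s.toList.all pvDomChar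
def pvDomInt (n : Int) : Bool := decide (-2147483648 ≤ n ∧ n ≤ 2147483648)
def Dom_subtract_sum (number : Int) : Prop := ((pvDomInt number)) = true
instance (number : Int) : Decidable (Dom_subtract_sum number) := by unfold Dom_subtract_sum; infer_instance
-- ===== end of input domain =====

-- B replaces A's digit-sum-subtraction loop by the O(1) closed form
-- '9 if number > 9 else number' before the same dict lookup (return value only).

-- ===== PORT A =====

-- z = sum(int(i) for i in str(n))  (each i is a one-character string)
def pvDigitIntSum (n : Int) : Int :=
  ((PySem.Int.toChars n).map (fun c => (PySem.Int.ofChars? [c]).getD 0)).sum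

-- Nat.toDigitsCore produces the reversed decimal digits (for 0 < m < fuel).
theorem pvToDigitsCore_eq : ∀ fuel m (ds : List Char), 0 < m → m < fuel →
    Nat.toDigitsCore 10 fuel m ds = ((Nat.digits 10 m).map Nat.digitChar).reverse ++ ds := by
  intro fuel
  induction fuel with
  | zero => intro m ds _ h2; omega
  | succ fuel ih =>
    intro m ds hm _
    rw [Nat.toDigitsCore]
    rw [Nat.digits_def' (by norm_num : 1 < 10) hm]
    by_cases h0 : m / 10 = 0
    · simp [h0]
    · rw [if_neg h0, ih (m / 10) _ (by omega) (by omega)]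
      simp

-- The ported digit sum equals the sum of the base-10 digits of n.toNat (for n > 9).
theorem pvDigitIntSum_digits (n : Int) (h : 9 < n) :
    pvDigitIntSum n = ((Nat.digits 10 n.toNat).sum : Int) := by
  have hnn : ¬ (n < 0) := by omega
  have hchars : PySem.Int.toChars n = ((Nat.digits 10 n.toNat).map Nat.digitChar).reverse := by
    simp only [PySem.Int.toChars, if_neg hnn]
    rw [Nat.toDigits, pvToDigitsCore_eq _ _ _ (by omega) (by omega), List.append_nil]
  unfold pvDigitIntSum
  rw [hchars, List.map_reverse, List.sum_reverse, List.map_map]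
  have key : ∀ l : List ℕ, (∀ d ∈ l, d < 10) →
      (l.map ((fun c => (PySem.Int.ofChars? [c]).getD 0) ∘ Nat.digitChar)).sum = (l.sum : Int) := by
    intro l
    induction l with
    | nil => simp
    | cons d t ih =>
      intro hd
      have h10 : d < 10 := hd d (by simp)
      have hc : ((fun c => (PySem.Int.ofChars? [c]).getD 0) ∘ Nat.digitChar) d = (d : Int) := by
        interval_cases d <;> decide
      rw [List.map_cons, List.sum_cons, hc, ih (fun x hx => hd x (by simp [hx]))]
      push_cast; simp
  exact key _ (fun d hd => Nat.digits_lt_base (by norm_num) hd)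

-- Termination lemma for A's while loop (cited by name in its decreasing_by):
-- the digit sum of n > 9 is at least 1.
theorem pvDigitIntSum_pos (n : Int) (h : 9 < n) : 1 ≤ pvDigitIntSum n := by
  rw [pvDigitIntSum_digits n h]
  have hpos : ∀ m : ℕ, 0 < m → 0 < (Nat.digits 10 m).sum := by
    intro m
    induction m using Nat.strong_induction_on with
    | _ m ih =>
      intro hm
      rw [Nat.digits_def' (by norm_num : 1 < 10) hm]
      by_cases h0 : m % 10 = 0
      · have := ih (m / 10) (by omega) (by omega)
        simp only [List.sum_cons]; omega
      · simp only [List.sum_cons]; omega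
  have := hpos n.toNat (by omega)
  omega

-- while n > 9: z = sum(int(i) for i in str(n)); n -= z
def pvSubtractLoop (n : Int) : Int :=
  if h : n > 9 then
    pvSubtractLoop (n - pvDigitIntSum n)
  else n
termination_by n.toNat
decreasing_by
  have := pvDigitIntSum_pos n h
  omega

def subtract_sum (number : Int) : String :=
  let dict : PySem.Dict Int String := PySem.Dict.ofList [(99, "apple"), (9, "apple")]
  let n := pvSubtractLoop number
  (dict.get? n).getD ""   -- dict[n]; KeyError (get? = none) is excluded by Pre_

-- ===== PORT B =====
def subtract_sum_alt (number : Int) : String :=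
  ((PySem.Dict.ofList [(99, "apple"), (9, "apple")]).get?
      (if number > 9 then 9 else number)).getD ""   -- KeyError excluded by Pre_

-- ===== PRECONDITION & SPEC =====
-- Pre_ excludes exactly the inputs number < 9, where A's final loop value is number
-- itself, a missing dict key, so A raises KeyError (and B raises KeyError there too).
def Pre_subtract_sum (number : Int) : Prop := 9 ≤ number
instance (number : Int) : Decidable (Pre_subtract_sum number) := by unfold Pre_subtract_sum; infer_instance
def pvWitness_subtract_sum : Int := (15)

def Spec_subtract_sum (number : Int) (out : String) : Prop := out = subtract_sum_alt number
instance (number : Int) (out : String) : Decidable (Spec_subtract_sum number out) := by unfold Spec_subtract_sum; infer_instance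

-- ===== CLAIM (what is proved, stated in full; the proofs are below) =====
def Claim_equal_subtract_sum : Prop := ∀ (number : Int), Dom_subtract_sum number → Pre_subtract_sum number → Spec_subtract_sum number (subtract_sum number)

-- ===== LEMMAS AND PROOFS =====

theorem pvSubtractLoop_eq_nine (n : Int) (h : 9 < n) : pvSubtractLoop n = 9 := by
  induction hm : n.toNat using Nat.strong_induction_on generalizing n with
  | _ m ih =>
    subst hm
    rw [pvSubtractLoop, dif_pos h]
    have hz : pvDigitIntSum n = ((Nat.digits 10 n.toNat).sum : Int) := pvDigitIntSum_digits n h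
    set s := (Nat.digits 10 n.toNat).sum with hs
    have hle : s ≤ n.toNat := Nat.digit_sum_le 10 n.toNat
    have hlt : s < n.toNat := by
      have h10 : 10 ≤ n.toNat := by omega
      have hpos : 0 < n.toNat := by omega
      rw [hs, Nat.digits_def' (by norm_num : 1 < 10) hpos]
      have := Nat.digit_sum_le 10 (n.toNat / 10)
      simp only [List.sum_cons]
      omega
    have hpos : 1 ≤ pvDigitIntSum n := pvDigitIntSum_pos n h
    have hmod : n.toNat % 9 = s % 9 := Nat.modEq_nine_digits_sum n.toNat
    by_cases h9 : 9 < n - pvDigitIntSum n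
    · exact ih (n - pvDigitIntSum n).toNat (by omega) _ h9 rfl
    · rw [pvSubtractLoop, dif_neg h9]
      omega

-- ===== VERDICT (by name: the statement is the Claim_ definition above) =====
theorem subtract_sum_spec : Claim_equal_subtract_sum := by
  intro number _ hpre
  unfold Pre_subtract_sum at hpre
  have hloop : pvSubtractLoop number = 9 := by
    by_cases h : 9 < number
    · exact pvSubtractLoop_eq_nine number h
    · have h9 : number = 9 := by omega
      subst h9; rw [pvSubtractLoop]; norm_num
  unfold Spec_subtract_sum subtract_sum subtract_sum_alt
  simp only [hloop]
  by_cases h : number > 9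
  · rw [if_pos h]
  · have h9 : number = 9 := by omega
    subst h9
    rfl
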